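-- pv_equiv track=rewrite | github.com/BarryZ807/DSC20 | lab/lab06.py | parity_mismatch
-- ===== SOURCE A (Python) =====
-- def parity_mismatch(lst):
--     """
--     Given a list of non-negative integers (`lst`), recursively check if
--     all elements at even indices are odd integers and all elements at
--     odd indices are even integers. Return True if `lst` satisfies this
--     requirement or `lst` is empty, otherwise return False.
--
--     >>> parity_mismatch([])
--     True
--     >>> parity_mismatch([1, 0, 3, 2, 5, 4])
--     True
--     >>> parity_mismatch([1, 0, 3, 2, 5, 5])
--     False
--     """
--     if lst == []:
--         return True
--     elif len(lst) == 1: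
--         if lst[0]%2==1:
--             return True
--         else:
--             return False
--     else:
--         if lst[0]%2 == 1 and lst[1]%2 != 1:
--             return parity_mismatch(lst[2:])
--         else:
--             return False
-- ===== SOURCE B (Python) =====
-- def parity_mismatch(lst):
--     expect_odd = True
--     for x in lst:
--         if (x % 2 == 1) != expect_odd:
--             return False
--         expect_odd = not expect_odd
--     return True
-- ===== Notes on version B (the rewrite author's own statement) =====
-- stated objective: simpler
-- what changed: Replaces the two-at-a-time recursion with repeated list slicing by a single linear pass that carries a flipping expected-parity flag and exits early on the first mismatch.
import Mathlib
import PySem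

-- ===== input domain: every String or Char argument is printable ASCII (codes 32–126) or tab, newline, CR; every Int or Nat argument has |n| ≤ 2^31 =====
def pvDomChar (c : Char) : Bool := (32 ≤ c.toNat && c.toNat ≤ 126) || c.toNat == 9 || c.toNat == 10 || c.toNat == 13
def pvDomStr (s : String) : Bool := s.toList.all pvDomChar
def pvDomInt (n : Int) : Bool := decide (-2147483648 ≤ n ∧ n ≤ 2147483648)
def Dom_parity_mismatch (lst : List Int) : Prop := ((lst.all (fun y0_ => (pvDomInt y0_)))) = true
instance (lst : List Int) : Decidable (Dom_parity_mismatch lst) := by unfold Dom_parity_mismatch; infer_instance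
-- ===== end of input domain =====

-- ===== PORT A =====
-- B: single linear pass with a flipping expected-parity flag (simpler than A's two-at-a-time slicing recursion).
-- A: recursion consuming two elements at a time via lst[2:].
def parity_mismatch (lst : List Int) : Bool :=
  match lst with
  | [] => true
  | [x] => if PySem.Int.mod x 2 == 1 then true else false
  | x :: y :: rest =>
      if PySem.Int.mod x 2 == 1 && !(PySem.Int.mod y 2 == 1) then parity_mismatch rest
      else false

-- ===== PORT B =====
-- loop of Source B: early return False on mismatch, flag flips each step
def pvAltGo (expect_odd : Bool) (lst : List Int) : Bool :=
  match lst with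
  | [] => true
  | x :: rest =>
      if (PySem.Int.mod x 2 == 1) != expect_odd then false
      else pvAltGo (!expect_odd) rest

def parity_mismatch_alt (lst : List Int) : Bool := pvAltGo true lst

-- ===== PRECONDITION & SPEC =====
def Spec_parity_mismatch (lst : List Int) (out : Bool) : Prop := out = parity_mismatch_alt lst
instance (lst : List Int) (out : Bool) : Decidable (Spec_parity_mismatch lst out) := by unfold Spec_parity_mismatch; infer_instance

-- ===== CLAIM (what is proved, stated in full; the proofs are below) =====
def Claim_equal_parity_mismatch : Prop := ∀ (lst : List Int), Dom_parity_mismatch lst → Spec_parity_mismatch lst (parity_mismatch lst)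

-- ===== LEMMAS AND PROOFS =====

-- ===== VERDICT (by name: the statement is the Claim_ definition above) =====
theorem pv_eq : ∀ (lst : List Int), parity_mismatch lst = pvAltGo true lst
  | [] => rfl
  | [x] => by
      simp only [parity_mismatch, pvAltGo]
      cases h : (PySem.Int.mod x 2 == 1) <;> simp [h]
  | x :: y :: rest => by
      have ih := pv_eq rest
      simp only [parity_mismatch, pvAltGo, ih]
      cases hx : (PySem.Int.mod x 2 == 1) <;> cases hy : (PySem.Int.mod y 2 == 1) <;>
        simp [hx, hy]

theorem parity_mismatch_spec : Claim_equal_parity_mismatch := by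
  intro lst _
  unfold Spec_parity_mismatch parity_mismatch_alt
  exact pv_eq lst
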